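-- pv_equiv track=rewrite | github.com/bankaraju/askanka.com | pipeline/autoresearch/etf_v3_eval/phase_2/regime_evaluation.py | apply_hysteresis
-- ===== SOURCE A (Python) =====
-- from typing import Iterable, Optional, Sequence
--
-- def apply_hysteresis(raw_zones: Sequence[str], k: int = 2) -> list[str]:
--     """Apply the production 2-day hysteresis rule.
--
--     The official zone flips only after the raw classification stays in a new
--     zone for `k` consecutive days. Single-day flips are absorbed into the
--     previous official zone.
--
--     Edge case: the first day has no prior official zone; we initialise the
--     official zone to the first raw zone (no hysteresis to apply yet).
--     """
--     if k < 1: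
--         raise ValueError("k must be >= 1")
--     if not raw_zones:
--         return []
--     out: list[str] = [raw_zones[0]]
--     candidate: Optional[str] = None
--     candidate_count = 0
--     for raw in raw_zones[1:]:
--         official = out[-1]
--         if raw == official:
--             candidate = None
--             candidate_count = 0
--             out.append(official)
--             continue
--         if candidate == raw:
--             candidate_count += 1
--         else:
--             candidate = raw
--             candidate_count = 1
--         if candidate_count >= k:
--             out.append(raw)
--             candidate = None
--             candidate_count = 0
--         else:
--             out.append(official)
--     return out
-- ===== SOURCE B (Python) =====
-- def apply_hysteresis(raw_zones, k=2):
--     if k < 1: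
--         raise ValueError("k must be >= 1")
--     # Phase 1: run-length encode raw_zones into maximal runs (value, length)
--     runs = []
--     i, n = 0, len(raw_zones)
--     while i < n:
--         j = i + 1
--         while j < n and raw_zones[j] == raw_zones[i]:
--             j += 1
--         runs.append((raw_zones[i], j - i))
--         i = j
--     if not runs:
--         return []
--     # Phase 2: consume runs tracking the official zone
--     out = []
--     official = runs[0][0]
--     for value, length in runs:
--         if value == official:
--             out.extend([official] * length)
--         elif length >= k:
--             out.extend([official] * (k - 1))
--             official = value
--             out.extend([official] * (length - (k - 1)))
--         else:
--             out.extend([official] * length)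
--     return out
-- ===== Notes on version B (the rewrite author's own statement) =====
-- stated objective: alternative
-- what changed: Replaces the per-element candidate/counter state machine with a two-phase algorithm: first run-length encode the input into maximal runs, then emit each run at once, splitting a flipping run into k-1 official copies followed by the new zone.
import Mathlib
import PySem

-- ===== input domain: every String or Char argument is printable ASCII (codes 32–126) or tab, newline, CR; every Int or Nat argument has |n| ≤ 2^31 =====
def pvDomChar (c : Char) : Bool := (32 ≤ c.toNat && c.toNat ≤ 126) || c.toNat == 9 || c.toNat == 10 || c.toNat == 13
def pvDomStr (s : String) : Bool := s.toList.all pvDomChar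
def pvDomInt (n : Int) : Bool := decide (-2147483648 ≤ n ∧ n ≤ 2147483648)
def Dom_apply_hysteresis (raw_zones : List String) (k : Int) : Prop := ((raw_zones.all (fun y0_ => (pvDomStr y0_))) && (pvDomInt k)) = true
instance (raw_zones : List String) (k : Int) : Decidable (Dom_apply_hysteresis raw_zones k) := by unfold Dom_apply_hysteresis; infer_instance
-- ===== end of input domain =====

-- B replaces A's per-element candidate/counter state machine by a two-phase algorithm
-- (run-length encode, then emit whole runs), same cost; equivalence proved for k ≥ 1
-- (for k < 1 the Python raises ValueError, excluded by Pre_).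

-- ===== PORT A =====
-- body of A's for-loop over the state (out, candidate, candidate_count); official = out[-1]
def pvStepA (k : Int) (st : List String × Option String × Int) (raw : String) :
    List String × Option String × Int :=
  let out := st.1
  let candidate := st.2.1
  let candidate_count := st.2.2
  let official := out.getLastD ""   -- out is never empty when this runs
  if raw == official then
    (out ++ [official], none, 0)
  else
    let cc :=
      if candidate == some raw then (candidate, candidate_count + 1)
      else (some raw, (1 : Int))
    if cc.2 ≥ k then (out ++ [raw], none, 0)
    else (out ++ [official], cc.1, cc.2)

def apply_hysteresis (raw_zones : List String) (k : Int) : List String :=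
  if k < 1 then []   -- Python raises ValueError here; excluded by Pre_
  else
    match raw_zones with
    | [] => []
    | z0 :: rest => (rest.foldl (pvStepA k) ([z0], none, 0)).1

-- ===== PORT B =====
-- Phase 1 of B: run-length encoding; the inner while loop that scans one run is the
-- takeWhile/dropWhile split of the remaining list.
def pvRuns (zs : List String) : List (String × Nat) :=
  match zs with
  | [] => []
  | x :: xs =>
    (x, 1 + (xs.takeWhile (· == x)).length) :: pvRuns (xs.dropWhile (· == x))
termination_by zs.length
decreasing_by
  have := List.length_dropWhile_le (· == x) xs
  simp only [List.length_cons]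
  omega

-- Phase 2 of B: loop body over the state (out, official).
-- k ≥ 1 and length ≥ k hold in the middle branch, so the Nat subtractions are exact
-- counterparts of Python's int arithmetic there.
def pvStepB (k : Int) (st : List String × String) (r : String × Nat) : List String × String :=
  let out := st.1
  let official := st.2
  let value := r.1
  let length := r.2
  if value == official then
    (out ++ List.replicate length official, official)
  else if (length : Int) ≥ k then
    (out ++ List.replicate (k - 1).toNat official ++ List.replicate (length - (k - 1).toNat) value, value)
  else
    (out ++ List.replicate length official, official)

def apply_hysteresis_alt (raw_zones : List String) (k : Int) : List String :=
  if k < 1 then []   -- Python raises ValueError here; excluded by Pre_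
  else
    match pvRuns raw_zones with
    | [] => []
    | r0 :: rs => ((r0 :: rs).foldl (pvStepB k) ([], r0.1)).1

-- ===== PRECONDITION & SPEC =====
-- Pre_ excludes exactly k < 1, where the Python A raises ValueError.
def Pre_apply_hysteresis (raw_zones : List String) (k : Int) : Prop := 1 ≤ k
instance (raw_zones : List String) (k : Int) : Decidable (Pre_apply_hysteresis raw_zones k) := by unfold Pre_apply_hysteresis; infer_instance
def pvWitness_apply_hysteresis : List String × Int := (["a", "b", "b", "a"], 2)

def Spec_apply_hysteresis (raw_zones : List String) (k : Int) (out : List String) : Prop := out = apply_hysteresis_alt raw_zones k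
instance (raw_zones : List String) (k : Int) (out : List String) : Decidable (Spec_apply_hysteresis raw_zones k out) := by unfold Spec_apply_hysteresis; infer_instance

-- ===== CLAIM (what is proved, stated in full; the proofs are below) =====
def Claim_equal_apply_hysteresis : Prop := ∀ (raw_zones : List String) (k : Int), Dom_apply_hysteresis raw_zones k → Pre_apply_hysteresis raw_zones k → Spec_apply_hysteresis raw_zones k (apply_hysteresis raw_zones k)

-- ===== LEMMAS AND PROOFS =====

-- recursive form of A's loop: official zone, candidate, count carried as parameters
def pvH (k : Int) (o : String) (cand : Option String) (cnt : Int) : List String → List String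
  | [] => []
  | raw :: rest =>
    if raw == o then o :: pvH k o none 0 rest
    else
      let c' := if cand == some raw then cnt + 1 else 1
      if c' ≥ k then raw :: pvH k raw none 0 rest
      else o :: pvH k o (some raw) c' rest

-- recursive form of B's run-consuming loop
def pvG (k : Int) (o : String) : List (String × Nat) → List String
  | [] => []
  | (v, n) :: rs =>
    if v == o then List.replicate n o ++ pvG k o rs
    else if (n : Int) ≥ k then
      List.replicate (k - 1).toNat o ++ List.replicate (n - (k - 1).toNat) v ++ pvG k v rs
    else List.replicate n o ++ pvG k o rs

lemma pv_foldA (k : Int) (l : List String) : ∀ (out : List String) (c : Option String) (n : Int),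
    out ≠ [] → (l.foldl (pvStepA k) (out, c, n)).1 = out ++ pvH k (out.getLastD "") c n l := by
  induction l with
  | nil => intro out c n _; simp [pvH]
  | cons raw rest ih =>
    intro out c n hne
    obtain ⟨ys, o', rfl⟩ : ∃ ys o', out = ys ++ [o'] := by
      rcases List.eq_nil_or_concat out with h | ⟨ys, o', h⟩
      · exact absurd h hne
      · exact ⟨ys, o', by simpa [List.concat_eq_append] using h⟩
    rw [List.foldl_cons, List.getLastD_concat]
    by_cases h1 : raw = o'
    · have hs : pvStepA k (ys ++ [o'], c, n) raw = ((ys ++ [o']) ++ [o'], none, 0) := by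
        simp [pvStepA, h1]
      rw [hs, ih _ _ _ (by simp), List.getLastD_concat]
      simp [pvH, h1, List.append_assoc]
    · by_cases hc : c = some raw
      · by_cases h2 : n + 1 ≥ k
        · have hs : pvStepA k (ys ++ [o'], c, n) raw = ((ys ++ [o']) ++ [raw], none, 0) := by
            simp [pvStepA, h1, hc, h2]
          rw [hs, ih _ _ _ (by simp), List.getLastD_concat]
          simp [pvH, h1, hc, h2, List.append_assoc]
        · have hs : pvStepA k (ys ++ [o'], c, n) raw = ((ys ++ [o']) ++ [o'], some raw, n + 1) := by
            simp [pvStepA, h1, hc, h2]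
          rw [hs, ih _ _ _ (by simp), List.getLastD_concat]
          simp [pvH, h1, hc, h2, List.append_assoc]
      · by_cases h2 : (1 : Int) ≥ k
        · have hs : pvStepA k (ys ++ [o'], c, n) raw = ((ys ++ [o']) ++ [raw], none, 0) := by
            simp [pvStepA, h1, hc, h2]
          rw [hs, ih _ _ _ (by simp), List.getLastD_concat]
          simp [pvH, h1, hc, h2, List.append_assoc]
        · have hs : pvStepA k (ys ++ [o'], c, n) raw = ((ys ++ [o']) ++ [o'], some raw, 1) := by
            simp [pvStepA, h1, hc, h2]
          rw [hs, ih _ _ _ (by simp), List.getLastD_concat]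
          simp [pvH, h1, hc, h2, List.append_assoc]

lemma pv_foldB (k : Int) (rs : List (String × Nat)) :
    ∀ (out : List String) (o : String),
    (rs.foldl (pvStepB k) (out, o)).1 = out ++ pvG k o rs := by
  induction rs with
  | nil => intro out o; simp [pvG]
  | cons r rest ih =>
    intro out o
    obtain ⟨v, n⟩ := r
    rw [List.foldl_cons]
    by_cases h1 : v == o
    · have hv : v = o := by simpa using h1
      simp [pvStepB, hv, ih, pvG, List.append_assoc]
    · by_cases h2 : (n : Int) ≥ k
      · simp [pvStepB, h1, h2, ih, pvG, List.append_assoc]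
      · simp [pvStepB, h1, h2, ih, pvG, List.append_assoc]

-- a run equal to the official zone is copied through unchanged
lemma pv_H_official (k : Int) (o : String) (rest : List String) :
    ∀ n : Nat, pvH k o none 0 (List.replicate n o ++ rest) =
      List.replicate n o ++ pvH k o none 0 rest := by
  intro n
  induction n with
  | zero => simp
  | succ m ih => simp [List.replicate_succ, pvH, ih]

-- the candidate state is irrelevant when the next element differs from the candidate
lemma pv_H_cand_irrel (k : Int) (o v : String) (c : Int) (rest : List String)
    (hd : ∀ y r, rest = y :: r → y ≠ v) :
    pvH k o (some v) c rest = pvH k o none 0 rest := by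
  cases rest with
  | nil => rfl
  | cons y r =>
    have hy : y ≠ v := hd y r rfl
    by_cases h1 : y == o
    · simp [pvH, h1]
    · have : (some v == some y) = false := by simpa using Ne.symm hy
      simp [pvH, h1, this]

-- processing one run of a non-official value, with the candidate counter at c
lemma pv_H_run (k : Int) (o v : String) (hvo : v ≠ o) (rest : List String) :
    ∀ (n : Nat) (c : Int), 0 ≤ c → c < k →
    pvH k o (some v) c (List.replicate n v ++ rest) =
      if k ≤ c + (n : Int) then
        List.replicate (k - c - 1).toNat o ++ List.replicate (n - (k - c - 1).toNat) v
          ++ pvH k v none 0 rest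
      else List.replicate n o ++ pvH k o (some v) (c + (n : Int)) rest := by
  intro n
  induction n with
  | zero =>
    intro c h0 hckc
    rw [if_neg (by push_cast; omega)]
    simp
  | succ m ih =>
    intro c h0 hck
    have hvo' : (v == o) = false := by simpa using hvo
    rw [List.replicate_succ, List.cons_append]
    by_cases h2 : c + 1 ≥ k
    · have : pvH k o (some v) c (v :: (List.replicate m v ++ rest)) =
          v :: pvH k v none 0 (List.replicate m v ++ rest) := by
        simp [pvH, hvo', h2]
      rw [this, pv_H_official]
      rw [if_pos (by push_cast; omega)]
      have h3 : (k - c - 1).toNat = 0 := by omega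
      have h4 : m + 1 - (k - c - 1).toNat = m + 1 := by omega
      rw [h4, h3]
      simp [List.replicate_succ]
    · have : pvH k o (some v) c (v :: (List.replicate m v ++ rest)) =
          o :: pvH k o (some v) (c + 1) (List.replicate m v ++ rest) := by
        simp [pvH, hvo', h2]
      rw [this, ih (c + 1) (by omega) (by omega)]
      by_cases h5 : k ≤ c + 1 + (m : Int)
      · rw [if_pos h5, if_pos (by push_cast at h5 ⊢; omega)]
        have h6 : (k - c - 1).toNat = (k - (c + 1) - 1).toNat + 1 := by omega
        have h7 : m + 1 - (k - c - 1).toNat = m - (k - (c + 1) - 1).toNat := by omega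
        rw [h7, h6, List.replicate_succ]
        simp
      · rw [if_neg h5, if_neg (by push_cast at h5 ⊢; omega)]
        have h8 : c + 1 + (m : Int) = c + ((m : Int) + 1) := by ring
        rw [h8]
        simp [List.replicate_succ]

-- starting a fresh run: no candidate behaves like candidate v with any count, on a run of v
lemma pv_H_none_start (k : Int) (o v : String) (hvo : v ≠ o) (t : List String) :
    pvH k o none 0 (v :: t) = pvH k o (some v) 0 (v :: t) := by
  have hvo' : (v == o) = false := by simpa using hvo
  simp [pvH, hvo']

lemma pv_main (k : Int) (hk : 1 ≤ k) :
    ∀ l : List String, ∀ o : String, pvG k o (pvRuns l) = pvH k o none 0 l := by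
  intro l
  induction l using pvRuns.induct with
  | case1 => intro o; simp [pvRuns, pvG, pvH]
  | case2 x xs ih =>
    intro o
    have ht : xs.takeWhile (· == x) = List.replicate (xs.takeWhile (· == x)).length x := by
      apply List.eq_replicate_length.mpr
      intro b hb
      exact eq_of_beq (List.mem_takeWhile_imp (p := (· == x)) (l := xs) hb)
    have hd : ∀ y r, xs.dropWhile (· == x) = y :: r → y ≠ x := by
      intro y r hyr
      have hne : xs.dropWhile (· == x) ≠ [] := by simp [hyr]
      have h := List.head_dropWhile_not (· == x) hne
      simp only [hyr, List.head_cons] at h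
      simpa using h
    have hcons : List.replicate (1 + (xs.takeWhile (· == x)).length) x ++ xs.dropWhile (· == x)
        = x :: (List.replicate ((xs.takeWhile (· == x)).length) x ++ xs.dropWhile (· == x)) := by
      rw [Nat.add_comm, List.replicate_succ]; simp
    have hsplit : x :: xs
        = List.replicate (1 + (xs.takeWhile (· == x)).length) x ++ xs.dropWhile (· == x) := by
      rw [hcons]
      conv_lhs => rw [← List.takeWhile_append_dropWhile (p := (· == x)) (l := xs)]
      rw [← ht]
    have hruns : pvRuns (x :: xs)
        = (x, 1 + (xs.takeWhile (· == x)).length) :: pvRuns (xs.dropWhile (· == x)) := by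
      rw [pvRuns]
    by_cases h1 : x = o
    · subst h1
      rw [hruns, hsplit, pv_H_official]
      simp [pvG, ih]
    · have hx' : (x == o) = false := by simpa using h1
      have hstart : pvH k o none 0 (x :: xs)
          = pvH k o (some x) 0
              (List.replicate (1 + (xs.takeWhile (· == x)).length) x ++ xs.dropWhile (· == x)) := by
        rw [hsplit, hcons, ← pv_H_none_start k o x h1]
      rw [hruns, hstart, pv_H_run k o x h1 _ _ 0 le_rfl (by omega)]
      by_cases h2 : k ≤ ((1 + (xs.takeWhile (· == x)).length : Nat) : Int)
      · rw [if_pos (by push_cast at h2 ⊢; omega)]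
        have e1 : k - 0 - 1 = k - 1 := by ring
        rw [e1]
        have hge : ((1 + (xs.takeWhile (· == x)).length : Nat) : Int) ≥ k := h2
        simp only [pvG, hx', Bool.false_eq_true, if_false, if_pos hge, ih]
      · rw [if_neg (by push_cast at h2 ⊢; omega)]
        rw [pv_H_cand_irrel k o x _ _ hd]
        have hge : ¬ ((1 + (xs.takeWhile (· == x)).length : Nat) : Int) ≥ k := h2
        simp only [pvG, hx', Bool.false_eq_true, if_false, if_neg hge, ih]

-- ===== VERDICT (by name: the statement is the Claim_ definition above) =====
theorem apply_hysteresis_spec : Claim_equal_apply_hysteresis := by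
  intro raw_zones k _ hk
  have hk1 : 1 ≤ k := hk
  unfold Spec_apply_hysteresis apply_hysteresis apply_hysteresis_alt
  rw [if_neg (by omega : ¬ k < 1), if_neg (by omega : ¬ k < 1)]
  cases raw_zones with
  | nil => simp [pvRuns]
  | cons z0 rest =>
    have hruns : pvRuns (z0 :: rest) =
        (z0, 1 + (rest.takeWhile (· == z0)).length) :: pvRuns (rest.dropWhile (· == z0)) := by
      rw [pvRuns]
    rw [hruns]
    simp only []
    rw [pv_foldA k rest [z0] none 0 (by simp), pv_foldB]
    rw [← hruns, pv_main k hk1 (z0 :: rest) z0]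
    simp [pvH]
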